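-- pv_equiv track=rewrite | github.com/koii-network/prometheus-beta | src/sum_subarrays.py | sum_subarrays
-- ===== SOURCE A (Python) =====
-- def sum_subarrays(arr, k):
--     """
--     Calculate the sum of all elements in subarrays with length less than or equal to k.
--
--     Args:
--         arr (list): A sorted list of integers
--         k (int): Maximum subarray length to consider
--
--     Returns:
--         int: Sum of all elements in subarrays of length <= k
--
--     Raises:
--         ValueError: If k is negative or arr is not a list
--         TypeError: If k is not an integer or arr contains non-integer elements
--     """
--     # Input validation
--     if not isinstance(arr, list):
--         raise TypeError("Input 'arr' must be a list")
--
--     if not isinstance(k, int):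
--         raise TypeError("Input 'k' must be an integer")
--
--     if k < 0:
--         raise ValueError("Input 'k' must be non-negative")
--
--     # Handle empty array case
--     if not arr:
--         return 0
--
--     # Validate array elements
--     if not all(isinstance(x, int) for x in arr):
--         raise TypeError("All elements in 'arr' must be integers")
--
--     # If k is 0, return 0
--     if k == 0:
--         return 0
--
--     # If k is greater than the array length, calculate number of subarrays
--     if k >= len(arr):
--         # Calculate total number of subarrays for each element
--         subarrays_per_elem = sum(range(1, len(arr) + 1))
--         return sum(arr) * subarrays_per_elem
--
--     # Calculate sum of subarrays
--     total_sum = 0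
--     n = len(arr)
--
--     # Iterate through all possible starting points
--     for start in range(n):
--         # Consider subarrays of length 1 to k starting from this point
--         current_sum = 0
--         for length in range(1, k + 1):
--             # Break if we go beyond the array
--             if start + length > n:
--                 break
--
--             # Add current subarray
--             subarray = arr[start:start+length]
--             current_sum = sum(subarray)
--             total_sum += current_sum * (n - start - length + 1)
--
--     return total_sum
-- ===== SOURCE B (Python) =====
-- def sum_subarrays(arr, k):
--     """Same result as A: incremental running sums (O(n*k)) instead of
--     re-summing every slice (O(n*k^2)); closed form for k >= len(arr)."""
--     n = len(arr)
--     if n == 0 or k == 0: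
--         return 0
--     if k >= n:
--         return sum(arr) * (n * (n + 1) // 2)
--     total = 0
--     for start in range(n):
--         current = 0
--         for end in range(start, min(start + k, n)):
--             current += arr[end]
--             total += current * (n - end)
--     return total
-- ===== Notes on version B (the rewrite author's own statement) =====
-- stated objective: faster
-- what changed: B maintains each subarray's running sum incrementally (one addition per extension) instead of re-summing the whole slice for every length, and replaces the sum(range(1,n+1)) pass of the k>=n branch with the closed form n*(n+1)//2; A raises ValueError for k<0, so Pre_ is 0 <= k.
import Mathlib
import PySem

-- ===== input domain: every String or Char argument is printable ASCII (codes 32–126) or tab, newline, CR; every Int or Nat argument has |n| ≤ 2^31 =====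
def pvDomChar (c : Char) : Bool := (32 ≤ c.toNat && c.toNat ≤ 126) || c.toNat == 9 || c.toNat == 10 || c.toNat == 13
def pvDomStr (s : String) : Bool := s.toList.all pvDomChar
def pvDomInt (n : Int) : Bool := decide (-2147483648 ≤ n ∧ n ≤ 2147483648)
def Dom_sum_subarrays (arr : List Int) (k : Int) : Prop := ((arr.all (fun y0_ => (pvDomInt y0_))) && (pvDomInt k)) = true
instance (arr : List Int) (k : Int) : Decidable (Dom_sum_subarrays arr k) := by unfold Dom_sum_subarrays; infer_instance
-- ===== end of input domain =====

-- B replaces A's per-length slice re-summing with an incremental running sum and the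
-- sum(range(1,n+1)) pass with the closed form n*(n+1)//2. Equal return values for 0 ≤ k.

-- ===== PORT A =====
-- inner loop of A: for length in range(1, k+1): break if start+length > n;
-- total += sum(arr[start:start+length]) * (n - start - length + 1)
def sumSubA_inner (arr : List Int) (n start k length : Nat) : Int :=
  if length > k then 0
  else if start + length > n then 0
  else (PySem.List.slice arr (some (start : Int)) (some ((start : Int) + (length : Int)))).sum
         * ((n : Int) - (start : Int) - (length : Int) + 1)
       + sumSubA_inner arr n start k (length + 1)
termination_by k + 1 - length

def sum_subarrays (arr : List Int) (k : Int) : Int :=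
  if arr = [] then 0
  else if k = 0 then 0
  else if k ≥ (arr.length : Int) then
    arr.sum * (PySem.List.pyRange 1 ((arr.length : Int) + 1) 1).sum
  else
    (List.range arr.length).foldl
      (fun total start => total + sumSubA_inner arr arr.length start k.toNat 1) 0

-- ===== PORT B =====
-- inner loop of B: for end in range(start, min(start+k, n)): current += arr[end];
-- total += current * (n - end).  arr.getD e 0 renders arr[end]; e < arr.length always holds here.
def sumSubB_inner (arr : List Int) (n stop e : Nat) (current : Int) : Int :=
  if e ≥ stop then 0
  else
    let c := current + arr.getD e 0
    c * ((n : Int) - (e : Int)) + sumSubB_inner arr n stop (e + 1) c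
termination_by stop - e

def sum_subarrays_alt (arr : List Int) (k : Int) : Int :=
  let n := arr.length
  if n = 0 ∨ k = 0 then 0
  else if k ≥ (n : Int) then
    arr.sum * PySem.Int.floordiv ((n : Int) * ((n : Int) + 1)) 2
  else
    (List.range n).foldl
      (fun total start => total + sumSubB_inner arr n (min (start + k.toNat) n) start 0) 0

-- ===== PRECONDITION & SPEC =====
-- A raises ValueError when k < 0; Pre_ excludes exactly those inputs.
def Pre_sum_subarrays (arr : List Int) (k : Int) : Prop := 0 ≤ k
instance (arr : List Int) (k : Int) : Decidable (Pre_sum_subarrays arr k) := by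
  unfold Pre_sum_subarrays; infer_instance
def pvWitness_sum_subarrays : List Int × Int := ([1, 2, 3, 4], 2)

def Spec_sum_subarrays (arr : List Int) (k : Int) (out : Int) : Prop := out = sum_subarrays_alt arr k
instance (arr : List Int) (k : Int) (out : Int) : Decidable (Spec_sum_subarrays arr k out) := by unfold Spec_sum_subarrays; infer_instance

-- ===== CLAIM (what is proved, stated in full; the proofs are below) =====
def Claim_equal_sum_subarrays : Prop := ∀ (arr : List Int) (k : Int), Dom_sum_subarrays arr k → Pre_sum_subarrays arr k → Spec_sum_subarrays arr k (sum_subarrays arr k)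

-- ===== LEMMAS AND PROOFS =====

-- sum(range(1, n+1)) doubled is n*(n+1)
lemma pyRange_tri (n : Nat) :
    2 * (PySem.List.pyRange 1 ((n : Nat) + 1) 1).sum = (n : Int) * ((n : Int) + 1) := by
  induction n with
  | zero => decide
  | succ m ih =>
      have h : PySem.List.pyRange 1 ((m : Int) + 1 + 1) 1
          = PySem.List.pyRange 1 ((m : Int) + 1) 1 ++ [(m : Int) + 1] := by
        simpa using PySem.List.pyRange_one_succ_right (a := 1) (b := (m : Int) + 1) (by omega)
      push_cast
      rw [h, List.sum_append]
      push_cast at ih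
      simp only [List.sum_cons, List.sum_nil]
      ring_nf
      ring_nf at ih
      omega

lemma inner_eq (arr : List Int) (start k : Nat) :
    ∀ d j current, j + d = k → current = ((arr.drop start).take j).sum →
      sumSubA_inner arr arr.length start k (j + 1)
        = sumSubB_inner arr arr.length (min (start + k) arr.length) (start + j) current := by
  intro d
  induction d with
  | zero =>
      intro j current hj _
      rw [sumSubA_inner, sumSubB_inner]
      have hjk : j = k := by omega
      simp [hjk]
  | succ m ih =>
      intro j current hj hcur
      rw [sumSubA_inner, sumSubB_inner]
      have hjk : j < k := by omega
      by_cases hn : start + j + 1 > arr.length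
      · have h1 : ¬ (j + 1 > k) := by omega
        have h2 : start + (j + 1) > arr.length := by omega
        have h3 : start + j ≥ min (start + k) arr.length := by omega
        simp [h1, h2, h3]
      · rw [not_lt] at hn
        have h1 : ¬ (j + 1 > k) := by omega
        have h2 : ¬ (start + (j + 1) > arr.length) := by omega
        have h3 : ¬ (start + j ≥ min (start + k) arr.length) := by omega
        simp only [h1, if_false, h2, h3, if_false]
        have hidx : start + j < arr.length := by omega
        have hslice : PySem.List.slice arr (some (start : Int)) (some ((start : Int) + ((j : Int) + 1)))
            = (arr.drop start).take (j + 1) := by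
          have := PySem.List.slice_natCast_add (xs := arr) (j := start) (n := j + 1)
          push_cast at this ⊢
          simpa using this
        have hget : arr.getD (start + j) 0 = (arr.drop start).getD j 0 := by
          simp [List.getD_eq_getElem?_getD, List.getElem?_drop]
        have hjlt : j < (arr.drop start).length := by
          simp [List.length_drop]; omega
        have htake : ((arr.drop start).take (j + 1)).sum
            = ((arr.drop start).take j).sum + (arr.drop start).getD j 0 := by
          rw [List.take_add_one]
          simp [List.getD_eq_getElem?_getD, List.getElem?_eq_getElem hjlt]
        have hIH := ih (j + 1) (current + arr.getD (start + j) 0) (by omega)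
          (by rw [htake, hcur, hget])
        rw [show start + (j + 1) = start + j + 1 by omega] at hIH
        push_cast
        rw [hslice, htake, ← hget, hIH, hcur]
        push_cast
        ring

lemma foldl_congr_range (n : Nat) (f g : Int → Nat → Int)
    (h : ∀ x, x < n → ∀ a, f a x = g a x) :
    ∀ (init : Int), (List.range n).foldl f init = (List.range n).foldl g init := by
  induction n with
  | zero => intro init; simp
  | succ m ih =>
      intro init
      rw [List.range_succ]
      simp only [List.foldl_append, List.foldl_cons, List.foldl_nil]
      rw [ih (fun x hx => h x (by omega)), h m (by omega)]

-- ===== VERDICT (by name: the statement is the Claim_ definition above) =====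
theorem sum_subarrays_spec : Claim_equal_sum_subarrays := by
  intro arr k _ hpre
  unfold Spec_sum_subarrays sum_subarrays sum_subarrays_alt
  by_cases he : arr = []
  · simp [he]
  · have hne : arr.length ≠ 0 := by simpa using he
    simp only [he, if_false]
    by_cases hk0 : k = 0
    · simp [hk0, hne]
    · simp only [hk0, if_false, hne, or_false]
      by_cases hbig : k ≥ (arr.length : Int)
      · simp only [hbig, if_true]
        congr 1
        have h2 := pyRange_tri arr.length
        have hfd : PySem.Int.floordiv ((arr.length : Int) * ((arr.length : Int) + 1)) 2
            = ((arr.length : Int) * ((arr.length : Int) + 1)) / 2 :=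
          PySem.Int.floordiv_eq_ediv_of_pos (by omega)
        rw [hfd]
        omega
      · simp only [hbig, if_false]
        refine foldl_congr_range _ _ _ ?_ 0
        intro start hs a
        congr 1
        have hk1 : 1 ≤ k.toNat := by
          have : 0 < k := lt_of_le_of_ne hpre (Ne.symm hk0)
          omega
        have := inner_eq arr start k.toNat k.toNat 0 0 (by omega) (by simp)
        simpa using this
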